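-- pv_equiv track=rewrite | github.com/KelstonClub/simple-steganography | working-example-receive.py | message_as_bits
-- ===== SOURCE A (Python) =====
-- def message_as_bits(message):
--     #
--     # Turn a message into a list of bytes where
--     # each byte is a tuple of bits
--     #
--     message_bytes = bytes(message, encoding="ascii")
--     message_bits = []
--     for byte in message_bytes:
--         bits = []
--         for b in range(8):
--             bits.append(byte & 1)
--             byte = byte >> 1
--         message_bits.append(tuple(bits[::-1]))
--
--     return message_bits
-- ===== SOURCE B (Python) =====
-- def message_as_bits(message):
--     return [tuple(int(c) for c in format(byte, "08b"))
--             for byte in bytes(message, encoding="ascii")]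
-- ===== Notes on version B (the rewrite author's own statement) =====
-- stated objective: idiomatic
-- what changed: The inner 8-step shift/mask loop with a final reversal is replaced by formatting each byte as an 8-digit MSB-first binary string and mapping its digits to ints; the whole function collapses to one comprehension.
import Mathlib
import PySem

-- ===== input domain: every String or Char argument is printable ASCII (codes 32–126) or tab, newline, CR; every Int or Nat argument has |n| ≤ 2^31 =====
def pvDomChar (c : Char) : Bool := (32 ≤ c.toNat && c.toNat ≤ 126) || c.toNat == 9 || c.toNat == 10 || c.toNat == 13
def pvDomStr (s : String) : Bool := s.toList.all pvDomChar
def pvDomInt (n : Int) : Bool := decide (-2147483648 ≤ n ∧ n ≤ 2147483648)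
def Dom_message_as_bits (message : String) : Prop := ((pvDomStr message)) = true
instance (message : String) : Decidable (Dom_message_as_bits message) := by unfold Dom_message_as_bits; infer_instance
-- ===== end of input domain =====

-- B replaces A's 8-step shift/mask loop plus final reversal by formatting each byte
-- as an 8-digit MSB-first binary string and mapping its digits to ints (idiomatic; same cost).
-- ===== PORT A =====
-- A's inner loop over range(8): append (byte & 1), shift byte right; then reverse.
def pvAByte (n : Nat) : List Int :=
  let st := (List.range 8).foldl
    (fun (st : List Int × Int) _ => (st.1 ++ [Int.land st.2 1], Int.shiftRight st.2 1)) ([], (n : Int))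
  st.1.reverse

def message_as_bits (message : String) : List (List Int) :=
  message.toList.foldl (fun acc c => acc ++ [pvAByte c.toNat]) []

-- ===== PORT B =====
-- format(byte, "08b"): binary digits MSB-first, zero-padded to width 8; int(c) on a digit char.
def pvFormat08b (n : Nat) : List Char :=
  let ds := Nat.toDigits 2 n
  List.replicate (8 - ds.length) '0' ++ ds

def pvBByte (n : Nat) : List Int :=
  (pvFormat08b n).map (fun ch => ((ch.toNat : Int) - 48))

def message_as_bits_alt (message : String) : List (List Int) :=
  message.toList.map (fun c => pvBByte c.toNat)

-- ===== PRECONDITION & SPEC =====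
def Spec_message_as_bits (message : String) (out : List (List Int)) : Prop := out = message_as_bits_alt message
instance (message : String) (out : List (List Int)) : Decidable (Spec_message_as_bits message out) := by unfold Spec_message_as_bits; infer_instance

-- ===== CLAIM (what is proved, stated in full; the proofs are below) =====
def Claim_equal_message_as_bits : Prop := ∀ (message : String), Dom_message_as_bits message → Spec_message_as_bits message (message_as_bits message)

-- ===== LEMMAS AND PROOFS =====
theorem pvByte_eq : ∀ n, n < 128 → pvAByte n = pvBByte n := by decide

theorem pvFoldl_append (f : Char → List Int) :
    ∀ (l : List Char) (acc : List (List Int)),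
      l.foldl (fun acc c => acc ++ [f c]) acc = acc ++ l.map f := by
  intro l
  induction l with
  | nil => simp
  | cons c t ih => intro acc; simp [List.foldl, ih]

-- ===== VERDICT (by name: the statement is the Claim_ definition above) =====
theorem message_as_bits_spec : Claim_equal_message_as_bits := by
  intro message hdom
  unfold Spec_message_as_bits message_as_bits message_as_bits_alt
  rw [pvFoldl_append]
  simp only [List.nil_append]
  apply List.map_congr_left
  intro c hc
  apply pvByte_eq
  have := List.all_eq_true.mp hdom c hc
  simp only [pvDomChar, Bool.or_eq_true, Bool.and_eq_true, decide_eq_true_eq, beq_iff_eq] at this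
  omega
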